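-- pv_equiv track=rewrite | github.com/YueWangMathbio/Transposon | NewScenario2 test.py | cut_circular_seq
-- ===== SOURCE A (Python) =====
-- def cut_circular_seq(i, sequences): # cut the sequences at i and add auxiliary
--     #0 and n-1
--     m = len(sequences) # number of sequences
--     n = len(sequences[0]) + 2 # number of genes, including auxiliary 0 and
--     # n - 1
--     cut_sequence_i = [[-1] * n for j in range(m)] # initialize the cut sequences
--     for j in range(m): # for each sequence
--         cut_sequence_i[j][0] = 0
--         cut_sequence_i[j][n-1] = n - 1 # add auxiliary genes
--         location_i = sequences[j].index(i) # where i appears in sequence j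
--         for k in range(location_i, n-2):
--             cut_sequence_i[j][k-location_i+1] = sequences[j][k]
--         for k in range(0, location_i):
--             cut_sequence_i[j][n-location_i+k-1] = sequences[j][k]
--             # fill in genes to proper locations
--     return cut_sequence_i
-- ===== SOURCE B (Python) =====
-- def cut_circular_seq(i, sequences): # cut the sequences at i and add auxiliary
--     # 0 and n-1; rows built by slice rotation instead of a preallocated buffer
--     n = len(sequences[0]) + 2
--     def row(seq):
--         loc = seq.index(i)
--         return [0] + seq[loc:] + seq[:loc] + [n - 1]
--     return [row(seq) for seq in sequences]
-- ===== Notes on version B (the rewrite author's own statement) =====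
-- stated objective: simpler
-- what changed: Each output row is built directly as [0] + seq[loc:] + seq[:loc] + [n-1] by slice concatenation, replacing A's preallocated [-1]*n buffer filled in place by two index-arithmetic loops.
-- outside the precondition, e.g. on cut_circular_seq(1, [[1], [1, 2]]): A returns [[0, 1, 2], [0, 1, 2]], B returns [[0, 1, 2], [0, 1, 2, 2]]
import Mathlib
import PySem

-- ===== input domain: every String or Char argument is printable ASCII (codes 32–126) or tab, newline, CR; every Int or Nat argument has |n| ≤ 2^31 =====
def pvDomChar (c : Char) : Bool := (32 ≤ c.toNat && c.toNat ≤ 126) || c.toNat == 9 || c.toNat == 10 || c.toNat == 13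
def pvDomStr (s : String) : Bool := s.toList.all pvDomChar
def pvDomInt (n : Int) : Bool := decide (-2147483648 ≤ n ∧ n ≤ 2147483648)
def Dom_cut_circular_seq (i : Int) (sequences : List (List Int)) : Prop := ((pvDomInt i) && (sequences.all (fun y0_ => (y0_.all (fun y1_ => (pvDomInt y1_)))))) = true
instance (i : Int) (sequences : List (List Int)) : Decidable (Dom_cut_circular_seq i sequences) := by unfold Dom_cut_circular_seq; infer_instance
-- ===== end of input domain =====

-- B builds each row directly by slice rotation ([0] + seq[loc:] + seq[:loc] + [n-1])
-- instead of A's preallocated [-1]*n buffer filled in place by two offset-computing loops.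

-- ===== PORT A =====
def cut_circular_seq (i : Int) (sequences : List (List Int)) : List (List Int) :=
  -- n = len(sequences[0]) + 2 (sequences[0] raises IndexError on []; such inputs are outside Pre_)
  let n : Nat := (sequences.headD []).length + 2
  -- 'for j in range(m): … sequences[j] …' accesses exactly the rows in order: the map over sequences
  sequences.map (fun s =>
    let buf := List.replicate n (-1 : Int)           -- [-1] * n
    let buf := buf.set 0 0                           -- cut_sequence_i[j][0] = 0
    let buf := buf.set (n - 1) ((n : Int) - 1)       -- cut_sequence_i[j][n-1] = n - 1
    -- sequences[j].index(i): raises ValueError when i ∉ s; such inputs are outside Pre_ (getD 0 unreached there)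
    let loc := (PySem.List.index? s i).getD 0
    -- for k in range(location_i, n-2): cut_sequence_i[j][k-location_i+1] = sequences[j][k]
    -- (s[k] raises IndexError when k ≥ len(s), only reachable on ragged inputs outside Pre_; getD 0 unreached inside Pre_)
    let buf := (List.range' loc (n - 2 - loc)).foldl
      (fun (b : List Int) k => b.set (k - loc + 1) (s.getD k 0)) buf
    -- for k in range(0, location_i): cut_sequence_i[j][n-location_i+k-1] = sequences[j][k]
    (List.range loc).foldl
      (fun (b : List Int) k => b.set (n - loc + k - 1) (s.getD k 0)) buf)

-- ===== PORT B =====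
def cut_circular_seq_alt (i : Int) (sequences : List (List Int)) : List (List Int) :=
  let n : Nat := (sequences.headD []).length + 2
  sequences.map (fun s =>
    let loc := (PySem.List.index? s i).getD 0        -- seq.index(i); ValueError outside Pre_
    -- [0] + seq[loc:] + seq[:loc] + [n - 1]
    0 :: (PySem.List.slice s (some ((loc : Nat) : Int)) none ++
          PySem.List.slice s none (some ((loc : Nat) : Int)) ++ [(n : Int) - 1]))

-- ===== PRECONDITION & SPEC =====
-- Pre_ excludes exactly: the empty input (A raises IndexError on sequences[0]), inputs with a
-- row not containing i (ValueError from .index), and ragged inputs whose row lengths differ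
-- from row 0's, on which A either raises IndexError or silently truncates longer rows to row
-- 0's length — an artefact of sizing every buffer from len(sequences[0]).
def Pre_cut_circular_seq (i : Int) (sequences : List (List Int)) : Prop :=
  sequences ≠ [] ∧ ∀ s ∈ sequences, s.length = (sequences.headD []).length ∧ i ∈ s
instance (i : Int) (sequences : List (List Int)) : Decidable (Pre_cut_circular_seq i sequences) := by unfold Pre_cut_circular_seq; infer_instance
def pvWitness_cut_circular_seq : Int × List (List Int) := (2, [[1, 2, 3], [3, 2, 1]])

def Spec_cut_circular_seq (i : Int) (sequences : List (List Int)) (out : List (List Int)) : Prop := out = cut_circular_seq_alt i sequences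
instance (i : Int) (sequences : List (List Int)) (out : List (List Int)) : Decidable (Spec_cut_circular_seq i sequences out) := by unfold Spec_cut_circular_seq; infer_instance

-- ===== CLAIM (what is proved, stated in full; the proofs are below) =====
def Claim_equal_cut_circular_seq : Prop := ∀ (i : Int) (sequences : List (List Int)), Dom_cut_circular_seq i sequences → Pre_cut_circular_seq i sequences → Spec_cut_circular_seq i sequences (cut_circular_seq i sequences)

-- ===== LEMMAS AND PROOFS =====

-- folding index-writes over a list preserves length
lemma fill_length (g : Nat → Nat) (f : Nat → Int) :
    ∀ (l : List Nat) (b : List Int),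
      (l.foldl (fun acc k => acc.set (g k) (f k)) b).length = b.length := by
  intro l
  induction l with
  | nil => intro b; rfl
  | cons x xs ih => intro b; simp [List.foldl_cons, ih]

-- characterisation of a consecutive-write fold: positions t, …, t+c-1 receive f a, …, f (a+c-1)
lemma fill_get? (f : Nat → Int) :
    ∀ (c a t j : Nat) (b : List Int),
      ((List.range' a c).foldl (fun acc k => acc.set (k - a + t) (f k)) b)[j]? =
        if t ≤ j ∧ j < t + c ∧ j < b.length then some (f (a + (j - t))) else b[j]? := by
  intro c
  induction c with
  | zero => intro a t j b; simp; intro h1 h2 h3; omega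
  | succ c ih =>
    intro a t j b
    rw [List.range'_succ, List.foldl_cons]
    have hcongr : (List.range' (a+1) c).foldl (fun acc k => acc.set (k - a + t) (f k))
        (b.set (a - a + t) (f a)) =
        (List.range' (a+1) c).foldl (fun acc k => acc.set (k - (a+1) + (t+1)) (f k))
        (b.set (a - a + t) (f a)) := by
      apply PySem.List.foldl_congr_mem
      intro acc k hk
      have hge : k ≥ a + 1 := (List.mem_range'_1.mp hk).1
      have he : k - a + t = k - (a+1) + (t+1) := by omega
      rw [he]
    rw [hcongr, ih]
    simp only [List.length_set, List.getElem?_set, Nat.sub_self, Nat.zero_add]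
    by_cases h1 : t + 1 ≤ j ∧ j < t + 1 + c ∧ j < b.length
    · rw [if_pos h1]
      rw [if_pos (by omega : t ≤ j ∧ j < t + (c+1) ∧ j < b.length)]
      have : a + 1 + (j - (t+1)) = a + (j - t) := by omega
      rw [this]
    · rw [if_neg h1]
      by_cases h2 : t = j
      · subst h2
        by_cases h3 : t < b.length
        · simp only [if_pos h3]
          rw [if_pos (by omega : t ≤ t ∧ t < t + (c+1) ∧ t < b.length)]
          simp
        · simp only [if_neg h3]
          rw [if_neg (by omega : ¬(t ≤ t ∧ t < t + (c+1) ∧ t < b.length))]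
          exact (List.getElem?_eq_none (by omega)).symm
      · rw [if_neg h2]
        rw [if_neg (by omega : ¬(t ≤ j ∧ j < t + (c+1) ∧ j < b.length))]

-- one row: A's buffer-filling equals B's slice rotation
lemma row_eq (i : Int) (s : List Int) (n : Nat) (hn : n = s.length + 2) (hmem : i ∈ s) :
    ((List.range ((PySem.List.index? s i).getD 0)).foldl
      (fun (b : List Int) k => b.set (n - (PySem.List.index? s i).getD 0 + k - 1) (s.getD k 0))
      ((List.range' ((PySem.List.index? s i).getD 0) (n - 2 - (PySem.List.index? s i).getD 0)).foldl
        (fun (b : List Int) k => b.set (k - (PySem.List.index? s i).getD 0 + 1) (s.getD k 0))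
        (((List.replicate n (-1 : Int)).set 0 0).set (n - 1) ((n : Int) - 1))))
    = 0 :: (PySem.List.slice s (some (((PySem.List.index? s i).getD 0 : Nat) : Int)) none ++
            PySem.List.slice s none (some (((PySem.List.index? s i).getD 0 : Nat) : Int)) ++
            [(n : Int) - 1]) := by
  obtain ⟨loc, hloc⟩ := Option.isSome_iff_exists.mp ((PySem.List.index?_isSome_iff s i).mpr hmem)
  obtain ⟨hlt, hsv, _⟩ := PySem.List.getElem_of_index?_eq_some hloc
  rw [hloc]
  simp only [Option.getD_some]
  rw [PySem.List.slice_from_natCast, PySem.List.slice_to_natCast]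
  set L := s.length with hLdef
  have hshape : ∀ b0 : List Int, (List.range loc).foldl
      (fun (b : List Int) k => b.set (n - loc + k - 1) (s.getD k 0)) b0 =
      (List.range' 0 loc).foldl
      (fun (b : List Int) k => b.set (k - 0 + (n - loc - 1)) (s.getD k 0)) b0 := by
    intro b0
    rw [List.range_eq_range']
    apply PySem.List.foldl_congr_mem
    intro acc k hk
    have hklt : k < loc := by simpa using (List.mem_range'_1.mp hk).2
    have he : n - loc + k - 1 = k - 0 + (n - loc - 1) := by omega
    rw [he]
  rw [hshape]
  apply List.ext_getElem?
  intro j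
  rw [fill_get?, fill_get?]
  simp only [fill_length, List.length_set, List.length_replicate, List.getElem?_set,
    List.getElem?_replicate]
  have hgetD : ∀ (k : Nat) (hk : k < s.length), s.getD k 0 = s[k]'hk := by
    intro k hk
    simp [List.getD_eq_getElem?_getD, List.getElem?_eq_getElem hk]
  cases j with
  | zero =>
    rw [if_neg (by omega), if_neg (by omega)]
    simp [hn]
  | succ j' =>
    rw [List.getElem?_cons_succ]
    by_cases h1 : j' < L - loc
    · rw [if_neg (by omega), if_pos (by omega : 1 ≤ j' + 1 ∧ j' + 1 < 1 + (n - 2 - loc) ∧ j' + 1 < n)]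
      rw [hgetD (loc + (j' + 1 - 1)) (by omega)]
      rw [List.getElem?_append_left (by rw [List.length_append, List.length_drop]; omega)]
      rw [List.getElem?_append_left (by rw [List.length_drop]; omega)]
      rw [List.getElem?_drop]
      rw [List.getElem?_eq_getElem (by omega)]
      simp
    · by_cases h2 : j' < L
      · rw [if_pos (by omega : n - loc - 1 ≤ j' + 1 ∧ j' + 1 < n - loc - 1 + loc ∧ j' + 1 < n)]
        rw [hgetD (0 + (j' + 1 - (n - loc - 1))) (by omega)]
        rw [List.getElem?_append_left (by rw [List.length_append, List.length_drop, List.length_take]; omega)]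
        rw [List.getElem?_append_right (by rw [List.length_drop]; omega)]
        rw [List.length_drop]
        rw [List.getElem?_take_of_lt (by omega)]
        rw [List.getElem?_eq_getElem (by omega)]
        simp only [Option.some.injEq]
        congr 1
        omega
      · by_cases h3 : j' = L
        · rw [if_neg (by omega), if_neg (by omega), if_pos (by omega), if_pos (by omega)]
          rw [List.getElem?_append_right (by rw [List.length_append, List.length_drop, List.length_take]; omega)]
          rw [List.length_append, List.length_drop, List.length_take]
          rw [List.getElem?_eq_getElem (by simp; omega)]
          subst h3
          simp
        · rw [if_neg (by omega), if_neg (by omega), if_neg (by omega), if_neg (by omega),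
              if_neg (by omega)]
          rw [List.getElem?_eq_none (by simp; omega)]

-- ===== VERDICT (by name: the statement is the Claim_ definition above) =====
theorem cut_circular_seq_spec : Claim_equal_cut_circular_seq := by
  intro i sequences _ hpre
  obtain ⟨hne, hall⟩ := hpre
  unfold Spec_cut_circular_seq cut_circular_seq cut_circular_seq_alt
  refine List.map_congr_left ?_
  intro s hs
  obtain ⟨hlen, hmem⟩ := hall s hs
  exact row_eq i s ((sequences.headD []).length + 2) (by omega) hmem
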